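-- pv_equiv track=rewrite | github.com/xflr6/bitsets | bitsets/combos.py | reverse_shortlex
-- ===== SOURCE A (Python) =====
-- import collections
--
-- def reverse_shortlex(end, other, excludeend=False):
--     """Yield all intersections of end with other in reverse shortlex order.
--
--     >>> ['{:03b}'.format(s) for s in reverse_shortlex(0b111, [0b011, 0b101, 0b110])]
--     ['111', '011', '101', '110', '001', '010', '100', '000']
--
--     >>> ', '.join(''.join(sorted(s))
--     ... for s in reverse_shortlex({'a', 'b', 'c', 'd'},
--     ... [{'b', 'c', 'd'}, {'a', 'c', 'd'}, {'a', 'b', 'd'}, {'a', 'b', 'c'}]))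
--     'abcd, bcd, acd, abd, abc, cd, bd, bc, ad, ac, ab, d, c, b, a, '
--
--     >>> assert list(reverse_shortlex({1, 2}, [{1}, {2}], excludeend=True)) == \
--         [{1}, {2}, set()]
--     """
--     if not excludeend:
--         yield end
--
--     queue = collections.deque([(end, other)])
--
--     while queue:
--         current, other = queue.popleft()
--
--         while other:
--             first, other = other[0], other[1:]
--             result = current & first
--
--             yield result
--
--             if other:
--                 queue.append((result, other))
-- ===== SOURCE B (Python) =====
-- def reverse_shortlex(end, other, excludeend=False):
--     """Yield all intersections of end with other in reverse shortlex order.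
--
--     Direct enumeration instead of A's deque/BFS: for each size k in
--     ascending order, walk the positional k-combinations of other in
--     lexicographic order by DFS, folding & into an accumulator on the way
--     down and emitting the finished intersection at each leaf.
--     """
--     n = len(other)
--
--     def folds(acc, i, k, out):
--         if k == 0:
--             out.append(acc)
--             return
--         if i == n:
--             return
--         folds(acc & other[i], i + 1, k - 1, out)
--         folds(acc, i + 1, k, out)
--
--     for k in range(n + 1):
--         if k == 0 and excludeend:
--             continue
--         out = []
--         folds(end, 0, k, out)
--         yield from out
-- ===== Notes on version B (the rewrite author's own statement) =====
-- stated objective: simpler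
-- what changed: Replaces the deque-based BFS over (partial-intersection, remaining-suffix) queue states by a direct enumeration: for each size k in ascending order, a DFS walks the positional k-combinations of other in lexicographic order, folding & into an accumulator on the way down and emitting the intersection at each leaf.
import Mathlib
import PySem

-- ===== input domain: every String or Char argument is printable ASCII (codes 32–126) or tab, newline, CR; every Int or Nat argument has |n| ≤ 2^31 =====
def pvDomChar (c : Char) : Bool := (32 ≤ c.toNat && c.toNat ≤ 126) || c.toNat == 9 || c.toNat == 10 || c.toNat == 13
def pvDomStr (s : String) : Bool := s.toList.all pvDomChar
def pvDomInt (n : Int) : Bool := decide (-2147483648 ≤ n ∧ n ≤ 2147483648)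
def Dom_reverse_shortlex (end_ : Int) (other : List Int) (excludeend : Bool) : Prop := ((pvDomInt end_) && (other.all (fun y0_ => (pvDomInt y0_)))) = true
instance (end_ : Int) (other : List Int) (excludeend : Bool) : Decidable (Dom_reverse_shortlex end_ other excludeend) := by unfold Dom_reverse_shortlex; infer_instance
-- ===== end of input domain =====

-- B replaces A's deque-based BFS over partial intersections by a direct, simpler
-- enumeration: sizes ascending, lexicographic positional combinations, each
-- intersection recomputed by folding & from end (not faster, simpler).


-- ===== PORT A =====
-- inner `while other:` loop of one popped entry: returns (yielded results, queue entries appended)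
def innerA (current : Int) : List Int → List Int × List (Int × List Int)
  | [] => ([], [])
  | first :: rest =>
    let result := PySem.Int.band current first
    (result :: (innerA current rest).1,
     (if rest = [] then [] else [(result, rest)]) ++ (innerA current rest).2)

-- termination measure for the outer `while queue:` loop
def qMeasure (queue : List (Int × List Int)) : Nat :=
  (queue.map (fun p => 2 ^ p.2.length)).sum

theorem innerA_measure (current : Int) (other : List Int) :
    qMeasure (innerA current other).2 < 2 ^ other.length := by
  induction other with
  | nil => simp [innerA, qMeasure]
  | cons x rest ih =>
    by_cases h : rest = []
    · subst h; simp [innerA, qMeasure]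
    · simp only [innerA, qMeasure, List.map_append, List.sum_append, if_neg h,
        List.length_cons, List.map_cons, List.sum_cons, List.map_nil, List.sum_nil]
      have : qMeasure (innerA current rest).2 < 2 ^ rest.length := ih
      simp only [qMeasure] at this
      have h2 : (2:Nat) ^ (rest.length + 1) = 2 ^ rest.length + 2 ^ rest.length := by ring
      omega

-- outer `while queue:` loop (FIFO: pop front, append at the back)
def loopA : List (Int × List Int) → List Int
  | [] => []
  | (current, other) :: q =>
    (innerA current other).1 ++ loopA (q ++ (innerA current other).2)
termination_by queue => qMeasure queue
decreasing_by
  simp only [qMeasure, List.map_append, List.sum_append, List.map_cons, List.sum_cons]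
  have := innerA_measure current other
  simp only [qMeasure] at this
  omega

def reverse_shortlex (end_ : Int) (other : List Int) (excludeend : Bool) : List Int :=
  (if excludeend then [] else [end_]) ++ loopA [(end_, other)]

-- ===== PORT B =====
-- Source B's recursive `folds(acc, i, k, out)` (DFS over positional combinations,
-- folding & into the accumulator on the way down; the Python walks other by
-- index i, transcribed here as structural recursion on the remaining suffix)
def foldsB (acc : Int) (items : List Int) (k : Nat) : List Int :=
  match k, items with
  | 0, _ => [acc]
  | _ + 1, [] => []
  | k + 1, x :: tail => foldsB (PySem.Int.band acc x) tail k ++ foldsB acc tail (k + 1)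

def reverse_shortlex_alt (end_ : Int) (other : List Int) (excludeend : Bool) : List Int :=
  (List.range (other.length + 1)).flatMap (fun k =>
    if k = 0 ∧ excludeend then [] else foldsB end_ other k)

-- ===== PRECONDITION & SPEC =====
def Spec_reverse_shortlex (end_ : Int) (other : List Int) (excludeend : Bool) (out : List Int) : Prop := out = reverse_shortlex_alt end_ other excludeend
instance (end_ : Int) (other : List Int) (excludeend : Bool) (out : List Int) : Decidable (Spec_reverse_shortlex end_ other excludeend out) := by unfold Spec_reverse_shortlex; infer_instance

-- ===== CLAIM (what is proved, stated in full; the proofs are below) =====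
def Claim_equal_reverse_shortlex : Prop := ∀ (end_ : Int) (other : List Int) (excludeend : Bool), Dom_reverse_shortlex end_ other excludeend → Spec_reverse_shortlex end_ other excludeend (reverse_shortlex end_ other excludeend)

-- ===== LEMMAS AND PROOFS =====

-- positional combinations of size k, lexicographic order (proof-side spec of foldsB)
def combos : Nat → List Int → List (List Int)
  | 0, _ => [[]]
  | _ + 1, [] => []
  | k + 1, head :: tail => (combos k tail).map (fun c => head :: c) ++ combos (k + 1) tail

theorem foldsB_eq (items : List Int) : ∀ (acc : Int) (k : Nat),
    foldsB acc items k = (combos k items).map (fun c => c.foldl PySem.Int.band acc) := by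
  induction items with
  | nil => intro acc k; cases k <;> simp [foldsB, combos]
  | cons x tail ih =>
    intro acc k
    cases k with
    | zero => simp [foldsB, combos]
    | succ k =>
      simp only [foldsB, combos, ih, List.map_append, List.map_map]
      rfl

-- combinations of size k paired with the suffix of the list after the last chosen element
def comboT : Nat → List Int → List (List Int × List Int)
  | 0, xs => [([], xs)]
  | _ + 1, [] => []
  | k + 1, x :: xs =>
    (comboT k xs).map (fun p => (x :: p.1, p.2)) ++ comboT (k + 1) xs

-- one-step extensions of a combination c along its suffix s
def ext (c : List Int) : List Int → List (Int × List Int × List Int)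
  | [] => []
  | x :: rest => (x, c ++ [x], rest) :: ext c rest

theorem ext_cons (y : Int) (c s : List Int) :
    ext (y :: c) s = (ext c s).map (fun p => (p.1, y :: p.2.1, p.2.2)) := by
  induction s with
  | nil => simp [ext]
  | cons x rest ih => simp [ext, ih]

theorem comboT_succ (k : Nat) (xs : List Int) :
    comboT (k + 1) xs = (comboT k xs).flatMap (fun p => (ext p.1 p.2).map (fun q => (q.2.1, q.2.2))) := by
  induction xs generalizing k with
  | nil =>
    cases k with
    | zero => simp [comboT, ext]
    | succ k => simp [comboT]
  | cons x xs ih =>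
    cases k with
    | zero =>
      simp only [comboT, ext, List.flatMap_cons, List.flatMap_nil, List.append_nil,
        List.map_cons, List.nil_append, List.cons_append]
      have := ih 0
      simp only [comboT, List.flatMap_cons, List.flatMap_nil, List.append_nil] at this
      simp [this]
    | succ k =>
      simp only [comboT]
      rw [List.flatMap_append, List.flatMap_map]
      congr 1
      · rw [ih k, List.map_flatMap]
        apply List.flatMap_congr
        intro p _
        rw [ext_cons, List.map_map, List.map_map]
        rfl
      · exact ih (k + 1)

theorem combos_eq_comboT (k : Nat) (xs : List Int) :
    combos k xs = (comboT k xs).map Prod.fst := by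
  induction xs generalizing k with
  | nil => cases k <;> simp [combos, comboT]
  | cons x xs ih =>
    cases k with
    | zero => simp [combos, comboT]
    | succ k => simp [combos, comboT, ih, List.map_map, Function.comp]

theorem comboT_length_le (k : Nat) (xs : List Int) (p : List Int × List Int)
    (hp : p ∈ comboT k xs) : k + p.2.length ≤ xs.length := by
  induction xs generalizing k p with
  | nil =>
    cases k with
    | zero => simp [comboT] at hp; simp [hp]
    | succ k => simp [comboT] at hp
  | cons x xs ih =>
    cases k with
    | zero => simp [comboT] at hp; simp [hp]
    | succ k =>
      simp only [comboT, List.mem_append, List.mem_map] at hp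
      rcases hp with ⟨q, hq, rfl⟩ | hp
      · have := ih k q hq; simp at this ⊢; omega
      · have := ih (k + 1) p hp; simp at this ⊢; omega

-- the level-k queue: entries (intersection of combo, nonempty suffix)
def levelQ (end_ : Int) (o : List Int) (k : Nat) : List (Int × List Int) :=
  (comboT k o).flatMap (fun p =>
    if p.2 = [] then [] else [(p.1.foldl PySem.Int.band end_, p.2)])

def ysAll (Q : List (Int × List Int)) : List Int :=
  Q.flatMap (fun p => (innerA p.1 p.2).1)

def chAll (Q : List (Int × List Int)) : List (Int × List Int) :=
  Q.flatMap (fun p => (innerA p.1 p.2).2)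

-- round-robin: queue-based processing equals level-by-level processing
theorem loopA_rr (P R : List (Int × List Int)) :
    loopA (P ++ R) = ysAll P ++ loopA (R ++ chAll P) := by
  induction P generalizing R with
  | nil => simp [ysAll, chAll]
  | cons e P ih =>
    obtain ⟨v, s⟩ := e
    rw [List.cons_append, loopA]
    rw [List.append_assoc, ih]
    simp [ysAll, chAll, List.append_assoc]

theorem loopA_level (Q : List (Int × List Int)) :
    loopA Q = ysAll Q ++ loopA (chAll Q) := by
  have := loopA_rr Q []
  simpa using this

theorem innerA_fst (v : Int) (s : List Int) :
    (innerA v s).1 = s.map (fun x => PySem.Int.band v x) := by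
  induction s with
  | nil => simp [innerA]
  | cons x rest ih => simp [innerA, ih]

theorem ext_filt (end_ : Int) (c s : List Int) :
    (ext c s).flatMap (fun q => if q.2.2 = [] then [] else [((q.2.1).foldl PySem.Int.band end_, q.2.2)])
      = (innerA (c.foldl PySem.Int.band end_) s).2 := by
  induction s with
  | nil => simp [ext, innerA]
  | cons x rest ih =>
    simp only [ext, List.flatMap_cons, innerA, ih, List.foldl_append, List.foldl_cons,
      List.foldl_nil]

theorem ext_ys (end_ : Int) (c s : List Int) :
    (ext c s).map (fun q => (q.2.1).foldl PySem.Int.band end_)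
      = (innerA (c.foldl PySem.Int.band end_) s).1 := by
  rw [innerA_fst]
  induction s with
  | nil => simp [ext]
  | cons x rest ih => simp [ext, ih, List.foldl_append]

theorem chAll_levelQ (end_ : Int) (o : List Int) (k : Nat) :
    chAll (levelQ end_ o k) = levelQ end_ o (k + 1) := by
  unfold chAll levelQ
  rw [comboT_succ]
  simp only [List.flatMap_assoc, List.flatMap_map]
  apply List.flatMap_congr
  intro p _
  rcases p with ⟨c, s⟩
  by_cases hs : s = []
  · subst hs; simp [ext]
  · rw [if_neg hs]
    simp only [List.flatMap_cons, List.flatMap_nil, List.append_nil]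
    exact (ext_filt end_ c s).symm

theorem ysAll_levelQ (end_ : Int) (o : List Int) (k : Nat) :
    ysAll (levelQ end_ o k) = (combos (k + 1) o).map (fun c => c.foldl PySem.Int.band end_) := by
  unfold ysAll levelQ
  rw [combos_eq_comboT, comboT_succ]
  simp only [List.flatMap_assoc, List.map_flatMap, List.map_map]
  apply List.flatMap_congr
  intro p _
  rcases p with ⟨c, s⟩
  by_cases hs : s = []
  · subst hs; simp [ext]
  · rw [if_neg hs]
    simp only [List.flatMap_cons, List.flatMap_nil, List.append_nil]
    rw [← ext_ys end_ c s]
    simp [Function.comp]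

theorem levelQ_last (end_ : Int) (o : List Int) : levelQ end_ o o.length = [] := by
  unfold levelQ
  rw [List.flatMap_eq_nil_iff]
  intro p hp
  have h := comboT_length_le o.length o p hp
  have : p.2 = [] := by
    have := List.eq_nil_of_length_eq_zero (by omega : p.2.length = 0)
    exact this
  simp [this]

theorem loopA_levels (end_ : Int) (o : List Int) (m j : Nat) (h : j + m = o.length) :
    loopA (levelQ end_ o j) =
      (List.range m).flatMap (fun i => (combos (j + 1 + i) o).map (fun c => c.foldl PySem.Int.band end_)) := by
  induction m generalizing j with
  | zero =>
    have : j = o.length := by omega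
    subst this
    simp [levelQ_last, loopA]
  | succ m ih =>
    rw [loopA_level, chAll_levelQ, ysAll_levelQ, ih (j + 1) (by omega)]
    rw [List.range_succ_eq_map]
    have e1 : ∀ i : Nat, j + 1 + 1 + i = j + 1 + (i + 1) := fun i => by omega
    simp only [List.flatMap_cons, List.flatMap_map, Nat.succ_eq_add_one, Nat.add_zero, e1]

theorem loopA_main (end_ : Int) (o : List Int) :
    loopA [(end_, o)] =
      (List.range o.length).flatMap (fun i => (combos (1 + i) o).map (fun c => c.foldl PySem.Int.band end_)) := by
  by_cases ho : o = []
  · subst ho; simp [loopA, innerA]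
  · have h0 : levelQ end_ o 0 = [(end_, o)] := by
      unfold levelQ comboT
      simp [ho]
    have := loopA_levels end_ o o.length 0 (by omega)
    rw [h0] at this
    rw [this]

-- ===== VERDICT (by name: the statement is the Claim_ definition above) =====
theorem reverse_shortlex_spec : Claim_equal_reverse_shortlex := by
  intro end_ other excludeend _
  unfold Spec_reverse_shortlex reverse_shortlex reverse_shortlex_alt
  simp only [foldsB_eq]
  rw [loopA_main, List.range_succ_eq_map]
  have e1 : ∀ i : Nat, 1 + i = i + 1 := fun i => by omega
  simp only [List.flatMap_cons, List.flatMap_map, Nat.succ_eq_add_one, e1]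
  cases excludeend <;> simp [combos]
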